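-- pv_equiv track=rewrite | github.com/Leiden-University-City-Lab/BantjesAdapter | evaluation_json/generate_csv.py | categorize_key
-- ===== SOURCE A (Python) =====
-- def categorize_key(key):
--     categories = {
--         'grand_parents': 'grand_parents',
--         'children': 'children',
--         'education': 'education',
--         'careers': 'careers',
--         'particularities': 'particularities',
--         'spouses': 'spouses',
--         'parents': 'parents',
--         'in_laws': 'in_laws',
--         'far_family': 'far_family',
--         '': 'main_person'  # Keys that do not start with any specific category
--     }
--     for category in categories:
--         if key.startswith(category + '.'):
--             return categories[category]
--     return 'main_person'
-- ===== SOURCE B (Python) =====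
-- _CATEGORIES = {
--     'grand_parents': 'grand_parents',
--     'children': 'children',
--     'education': 'education',
--     'careers': 'careers',
--     'particularities': 'particularities',
--     'spouses': 'spouses',
--     'parents': 'parents',
--     'in_laws': 'in_laws',
--     'far_family': 'far_family',
-- }
--
--
-- def categorize_key(key):
--     i = key.find('.')
--     if i < 0:
--         return 'main_person'
--     return _CATEGORIES.get(key[:i], 'main_person')
-- ===== Notes on version B (the rewrite author's own statement) =====
-- stated objective: idiomatic
-- what changed: B extracts the prefix before the first '.' once (key.find) and does a single dict lookup with a 'main_person' default, replacing A's loop that tests key.startswith(category + '.') for every category.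
import Mathlib
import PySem

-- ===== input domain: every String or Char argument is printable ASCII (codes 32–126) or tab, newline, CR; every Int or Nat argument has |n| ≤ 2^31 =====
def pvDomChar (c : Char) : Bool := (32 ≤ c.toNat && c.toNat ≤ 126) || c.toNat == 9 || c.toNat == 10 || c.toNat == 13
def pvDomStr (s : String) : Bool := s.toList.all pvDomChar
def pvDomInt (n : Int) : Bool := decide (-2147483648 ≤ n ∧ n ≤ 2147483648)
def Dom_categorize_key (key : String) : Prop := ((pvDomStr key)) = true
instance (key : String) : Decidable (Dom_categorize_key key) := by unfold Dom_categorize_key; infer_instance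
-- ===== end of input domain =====

-- B replaces A's per-category startswith loop with one find('.') and a single dict lookup (idiomatic; return value only).

-- ===== PORT A =====
-- the literal 'categories' dict of A
def catsA : PySem.Dict String String := PySem.Dict.ofList
  [("grand_parents", "grand_parents"), ("children", "children"), ("education", "education"),
   ("careers", "careers"), ("particularities", "particularities"), ("spouses", "spouses"),
   ("parents", "parents"), ("in_laws", "in_laws"), ("far_family", "far_family"), ("", "main_person")]

-- 'for category in categories: if key.startswith(category + "."): return categories[category]'
-- (the lookup categories[category] always hits: category is drawn from the dict's own keys)
def loopA (key : String) : List String → String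
  | [] => "main_person"
  | c :: rest =>
    if PySem.Str.startswith key (c ++ ".") then (PySem.Dict.get? catsA c).getD "" else loopA key rest

def categorize_key (key : String) : String := loopA key catsA.keys

-- ===== PORT B =====
def catsB : PySem.Dict String String := PySem.Dict.ofList
  [("grand_parents", "grand_parents"), ("children", "children"), ("education", "education"),
   ("careers", "careers"), ("particularities", "particularities"), ("spouses", "spouses"),
   ("parents", "parents"), ("in_laws", "in_laws"), ("far_family", "far_family")]

def categorize_key_alt (key : String) : String :=
  let i := PySem.Str.find key "."
  if i < 0 then "main_person"
  else PySem.Dict.getD catsB (PySem.Str.slice key none (some i)) "main_person"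

-- ===== PRECONDITION & SPEC =====
def Spec_categorize_key (key : String) (out : String) : Prop := out = categorize_key_alt key
instance (key : String) (out : String) : Decidable (Spec_categorize_key key out) := by unfold Spec_categorize_key; infer_instance

-- ===== CLAIM (what is proved, stated in full; the proofs are below) =====
def Claim_equal_categorize_key : Prop := ∀ (key : String), Dom_categorize_key key → Spec_categorize_key key (categorize_key key)

-- ===== LEMMAS AND PROOFS =====

-- A's test key.startswith(c + '.') for a dot-free category c holds exactly when key has a dot
-- and the part before the first dot is c.
lemma startswith_dot_iff (L c : List Char) (hc : '.' ∉ c) :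
    (c ++ ['.']) <+: L ↔
      0 ≤ PySem.Chars.find L ['.'] ∧ L.take (PySem.Chars.find L ['.']).toNat = c := by
  constructor
  · rintro ⟨t, ht⟩
    rw [List.append_assoc] at ht
    have h0 : 0 ≤ PySem.Chars.find L ['.'] := by
      rw [PySem.Chars.find_nonneg_iff]
      exact ⟨c, t, by simpa using ht⟩
    obtain ⟨hpre, hmin⟩ := PySem.Chars.find_spec h0
    have hdropc : L.drop c.length = '.' :: t := by
      rw [← ht]; simp
    have hle : (PySem.Chars.find L ['.']).toNat ≤ c.length := by
      by_contra hgt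
      have hlt' : c.length < (PySem.Chars.find L ['.']).toNat := Nat.lt_of_not_le hgt
      exact hmin c.length hlt' (by rw [hdropc]; exact ⟨t, rfl⟩)
    set n := (PySem.Chars.find L ['.']).toNat with hn
    have heq : n = c.length := by
      rcases Nat.lt_or_ge n c.length with hlt | hge
      · exfalso
        rw [List.cons_prefix_iff] at hpre
        have hdrop : L.drop n = c.drop n ++ ('.' :: t) := by
          rw [← ht, List.drop_append_of_le_length (le_of_lt hlt)]
          simp
        rw [hdrop] at hpre
        have hne : c.drop n ≠ [] := by
          simp [List.drop_eq_nil_iff]; omega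
        obtain ⟨a, u, hau⟩ := List.exists_cons_of_ne_nil hne
        rw [hau] at hpre
        simp at hpre
        apply hc
        rw [← hpre]
        have : a ∈ c.drop n := by rw [hau]; exact List.mem_cons_self
        exact List.mem_of_mem_drop this
      · omega
    refine ⟨h0, ?_⟩
    rw [heq, ← ht, List.take_append_of_le_length (le_refl _), List.take_length]
  · rintro ⟨h0, htake⟩
    obtain ⟨hpre, -⟩ := PySem.Chars.find_spec h0
    obtain ⟨t, ht⟩ := hpre
    refine ⟨t, ?_⟩
    calc c ++ ['.'] ++ t = c ++ (['.'] ++ t) := by rw [List.append_assoc]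
    _ = L.take (PySem.Chars.find L ['.']).toNat ++ L.drop (PySem.Chars.find L ['.']).toNat := by
        rw [htake, ht]
    _ = L := List.take_append_drop _ _

-- String-level form of startswith_dot_iff, phrased in B's vocabulary (find and slice).
lemma sw (key c : String) (hc : '.' ∉ c.toList) :
    (PySem.Str.startswith key (c ++ ".") = true) ↔
      (0 ≤ PySem.Str.find key "." ∧
        PySem.Str.slice key none (some (PySem.Str.find key ".")) = c) := by
  have hfind : PySem.Str.find key "." = PySem.Chars.find key.toList ['.'] := by simp
  have hsw : (PySem.Str.startswith key (c ++ ".") = true) ↔ (c.toList ++ ['.']) <+: key.toList := by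
    rw [PySem.Str.startswith_eq, PySem.Chars.startswith_iff, String.toList_append]
    simp
  rw [hsw, startswith_dot_iff _ _ hc, hfind]
  refine and_congr_right fun h0 => ?_
  have hslice : (PySem.Str.slice key none (some (PySem.Chars.find key.toList ['.']))).toList
      = key.toList.take (PySem.Chars.find key.toList ['.']).toNat := by
    simp [PySem.Str.slice, PySem.List.slice_to _ h0]
  rw [← String.toList_inj, hslice]

theorem categorize_key_spec : Claim_equal_categorize_key := by
  intro key _
  unfold Spec_categorize_key categorize_key categorize_key_alt
  have hkeys : catsA.keys = ["grand_parents", "children", "education", "careers",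
      "particularities", "spouses", "parents", "in_laws", "far_family", ""] := by decide
  rw [hkeys]
  simp only [loopA]
  simp only [sw key "grand_parents" (by decide), sw key "children" (by decide),
      sw key "education" (by decide), sw key "careers" (by decide),
      sw key "particularities" (by decide), sw key "spouses" (by decide),
      sw key "parents" (by decide), sw key "in_laws" (by decide),
      sw key "far_family" (by decide), sw key "" (by decide)]
  by_cases h0 : PySem.Str.find key "." < 0
  · have h0c : PySem.Chars.find key.toList ['.'] < 0 := by simpa using h0
    simp [h0c, not_le.mpr h0c]
  · have h0c : 0 ≤ PySem.Chars.find key.toList ['.'] := by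
      simpa using not_lt.mp h0
    simp [h0c, not_lt.mpr h0c]
    set P := PySem.Str.slice key none (some (PySem.Chars.find key.toList ['.'])) with hP
    by_cases h1 : P = "grand_parents"; · rw [h1]; decide
    by_cases h2 : P = "children"; · rw [h2]; decide
    by_cases h3 : P = "education"; · rw [h3]; decide
    by_cases h4 : P = "careers"; · rw [h4]; decide
    by_cases h5 : P = "particularities"; · rw [h5]; decide
    by_cases h6 : P = "spouses"; · rw [h6]; decide
    by_cases h7 : P = "parents"; · rw [h7]; decide
    by_cases h8 : P = "in_laws"; · rw [h8]; decide
    by_cases h9 : P = "far_family"; · rw [h9]; decide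
    by_cases h10 : P = ""; · rw [h10]; decide
    rw [show catsB = PySem.Dict.mk
        [("grand_parents", "grand_parents"), ("children", "children"), ("education", "education"),
         ("careers", "careers"), ("particularities", "particularities"), ("spouses", "spouses"),
         ("parents", "parents"), ("in_laws", "in_laws"), ("far_family", "far_family")] from by decide]
    simp [h1, h2, h3, h4, h5, h6, h7, h8, h9, h10, PySem.Dict.getD, PySem.Dict.get?, Ne.symm h1, Ne.symm h2, Ne.symm h3, Ne.symm h4, Ne.symm h5,
      Ne.symm h6, Ne.symm h7, Ne.symm h8, Ne.symm h9]
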